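-- pv_equiv track=rewrite | github.com/adrian-dybwad/DGTCentaurMods | DGTCentaurMods/opt/DGTCentaurMods/tools/ble_relay.py | odd_par
-- ===== SOURCE A (Python) =====
-- def odd_par(b):
--     """Calculate odd parity for a byte and set MSB if needed.
--
--     Copied from game/millennium.py odd_par function.
--
--     Args:
--         b: Byte value (0-127)
--
--     Returns:
--         Byte with odd parity (MSB set if needed)
--     """
--     byte = b & 127
--     par = 1
--     for _ in range(7):
--         bit = byte & 1
--         byte = byte >> 1
--         par = par ^ bit
--     if par == 1:
--         byte = b | 128
--     else:
--         byte = b & 127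
--     return byte
-- ===== SOURCE B (Python) =====
-- def odd_par(b):
--     ones = bin(b & 127).count('1')
--     if ones % 2 == 0:
--         return b | 128
--     else:
--         return b & 127
-- ===== Notes on version B (the rewrite author's own statement) =====
-- stated objective: simpler
-- what changed: Replaces the per-bit shift/mask XOR loop with a single popcount of the masked byte (bin(b & 127).count('1')) and a parity test on that count.
import Mathlib
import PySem

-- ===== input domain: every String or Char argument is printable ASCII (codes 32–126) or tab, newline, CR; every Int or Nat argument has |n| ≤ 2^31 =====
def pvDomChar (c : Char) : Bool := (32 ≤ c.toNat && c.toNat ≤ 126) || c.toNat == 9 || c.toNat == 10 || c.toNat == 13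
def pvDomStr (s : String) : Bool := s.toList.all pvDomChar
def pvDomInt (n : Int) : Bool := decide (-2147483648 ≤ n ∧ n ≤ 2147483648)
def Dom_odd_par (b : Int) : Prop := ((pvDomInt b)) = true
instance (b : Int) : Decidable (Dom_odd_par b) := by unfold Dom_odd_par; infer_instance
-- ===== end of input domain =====

-- B replaces A's per-bit shift/mask XOR loop by a single popcount of the masked byte
-- (bin(b & 127).count('1')) and a parity test on that count; same return value, no loop.


-- ===== PORT A =====
-- literal port: byte = b & 127; par = 1; 7 iterations of (bit = byte & 1; byte >>= 1; par ^= bit)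
def odd_par (b : Int) : Int :=
  let byte := PySem.Int.band b 127
  let st := (PySem.List.pyRange 0 7 1).foldl
    (fun (s : Int × Int) _ => (s.1 >>> (1 : Nat), PySem.Int.bxor s.2 (PySem.Int.band s.1 1)))
    (byte, 1)
  if st.2 = 1 then PySem.Int.bor b 128 else PySem.Int.band b 127

-- ===== PORT B =====
-- ones = bin(b & 127).count('1')  — ported as PySem.Int.bitCount, the popcount bin(x).count('1') computes for x ≥ 0
def odd_par_alt (b : Int) : Int :=
  let ones : Int := (PySem.Int.bitCount (PySem.Int.band b 127) : Int)
  if PySem.Int.mod ones 2 = 0 then PySem.Int.bor b 128 else PySem.Int.band b 127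

-- ===== PRECONDITION & SPEC =====
def Spec_odd_par (b : Int) (out : Int) : Prop := out = odd_par_alt b
instance (b : Int) (out : Int) : Decidable (Spec_odd_par b out) := by unfold Spec_odd_par; infer_instance

-- ===== CLAIM (what is proved, stated in full; the proofs are below) =====
def Claim_equal_odd_par : Prop := ∀ (b : Int), Dom_odd_par b → Spec_odd_par b (odd_par b)

-- ===== LEMMAS AND PROOFS =====

-- Python's b & 127 is b mod 128 (two's-complement masking, also for negative b)
theorem band127 (b : Int) : PySem.Int.band b 127 = b % 128 := by
  unfold PySem.Int.band
  split
  · rw [if_pos (by norm_num)]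
    have h : b.toNat &&& Int.toNat 127 = b.toNat % 128 := by
      simpa using Nat.and_two_pow_sub_one_eq_mod b.toNat 7
    rw [h]; omega
  · rw [if_pos (by norm_num)]
    have h : Int.toNat 127 &&& (-b - 1).toNat = (-b - 1).toNat % 128 := by
      rw [Nat.and_comm]
      simpa using Nat.and_two_pow_sub_one_eq_mod (-b - 1).toNat 7
    rw [h]; omega

-- for the 128 possible masked bytes, A's XOR-loop condition and B's popcount condition agree
theorem cond_eq (r : Int) (h0 : 0 ≤ r) (h1 : r < 128) :
    (((PySem.List.pyRange 0 7 1).foldl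
        (fun (s : Int × Int) _ => (s.1 >>> (1 : Nat), PySem.Int.bxor s.2 (PySem.Int.band s.1 1)))
        (r, 1)).2 = 1)
    = (PySem.Int.mod (PySem.Int.bitCount r : Int) 2 = 0) := by
  interval_cases r <;> decide

theorem odd_par_spec : Claim_equal_odd_par := by
  intro b _
  unfold Spec_odd_par odd_par odd_par_alt
  simp only [band127]
  simp only [cond_eq (b % 128) (Int.emod_nonneg _ (by norm_num)) (Int.emod_lt_of_pos _ (by norm_num))]
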